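-- pv_equiv track=rewrite | github.com/IsaacG/Advent-of-Code | everybody_codes/quest_18.py | simple_flood_fill
-- ===== SOURCE A (Python) =====
-- Point = tuple[int, int]
--
-- def neighbors(position: Point) -> list[Point]:
--     """Return the neighbors adjacent to a position."""
--     x, y = position
--     return [(x + 1, y + 0), (x - 1, y + 0), (x + 0, y + 1), (x + 0, y - 1)]
--
-- def simple_flood_fill(canal: set[Point], trees: set[Point], todo: set[Point]) -> int:
--     """Simple flood fill from given starting points until all the trees are watered.
--
--     Return the number of steps until all trees are reached.
--     """
--     seen: set[Point] = set()
--     steps = 0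
--     while trees - seen:
--         seen.update(todo)
--         todo = {
--             neighbor
--             for position in todo
--             for neighbor in neighbors(position)
--             if neighbor in canal and neighbor not in seen
--         }
--         steps += 1
--     return steps - 1
-- ===== SOURCE B (Python) =====
-- Point = tuple[int, int]
--
-- def simple_flood_fill(canal: set[Point], trees: set[Point], todo: set[Point]) -> int:
--     """Water the trees by BFS from the starting points; return steps until all are wet.
--
--     Computes per-node BFS distances with a FIFO queue instead of advancing
--     whole set-frontiers, then takes the max distance over the trees.
--     """
--     dist: dict[Point, int] = {s: 0 for s in todo}
--     queue = list(todo)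
--     i = 0
--     while i < len(queue):
--         x, y = queue[i]
--         i += 1
--         d = dist[(x, y)]
--         for nbr in ((x + 1, y), (x - 1, y), (x, y + 1), (x, y - 1)):
--             if nbr in canal and nbr not in dist:
--                 dist[nbr] = d + 1
--                 queue.append(nbr)
--     return max((dist[t] for t in trees), default=-1)
-- ===== Notes on version B (the rewrite author's own statement) =====
-- stated objective: alternative
-- what changed: Replaces the ring-at-a-time frontier-set rebuild (advance a whole todo set per step, count steps) with a single FIFO-queue BFS that records a per-node distance in a dict and finally takes the max distance over the trees.
import Mathlib
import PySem

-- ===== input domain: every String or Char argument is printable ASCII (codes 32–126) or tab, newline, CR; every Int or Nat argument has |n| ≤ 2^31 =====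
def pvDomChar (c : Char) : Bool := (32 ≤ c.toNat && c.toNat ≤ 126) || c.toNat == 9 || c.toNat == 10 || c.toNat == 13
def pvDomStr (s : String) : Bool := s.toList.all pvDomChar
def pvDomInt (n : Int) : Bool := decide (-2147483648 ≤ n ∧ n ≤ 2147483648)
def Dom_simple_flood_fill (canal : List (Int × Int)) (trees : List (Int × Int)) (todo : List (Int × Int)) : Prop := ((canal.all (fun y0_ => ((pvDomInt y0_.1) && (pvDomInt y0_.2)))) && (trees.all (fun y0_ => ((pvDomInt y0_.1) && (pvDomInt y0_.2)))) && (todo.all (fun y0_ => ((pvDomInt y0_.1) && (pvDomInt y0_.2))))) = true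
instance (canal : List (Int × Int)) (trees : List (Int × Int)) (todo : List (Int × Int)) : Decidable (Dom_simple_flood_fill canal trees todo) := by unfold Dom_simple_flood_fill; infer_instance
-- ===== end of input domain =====

-- B replaces A's ring-at-a-time frontier-set advance with a FIFO-queue BFS recording per-node
-- distances in a dict, then takes the max distance over the trees (same values; alternative algorithm).


-- ===== PORT A =====
-- neighbors(position)
def pvNbrs (p : Int × Int) : List (Int × Int) :=
  [(p.1 + 1, p.2), (p.1 - 1, p.2), (p.1, p.2 + 1), (p.1, p.2 - 1)]

-- the set comprehension building the next `todo`
def pvNextTodo (canalS seen' todo : PySem.Set (Int × Int)) : PySem.Set (Int × Int) :=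
  todo.foldl
    (fun acc p => (pvNbrs p).foldl
      (fun acc n =>
        if PySem.Set.contains canalS n && !(PySem.Set.contains seen' n) then PySem.Set.add acc n else acc)
      acc)
    PySem.Set.empty

-- A's while-loop; fuel only makes it structural: on inputs satisfying Pre_ the loop provably
-- exits within canal.length + 2 iterations, so the fuel branch is never taken there
-- (on inputs outside Pre_ the Python loops forever).
def pvLoopA (canalS treesS : PySem.Set (Int × Int)) :
    Nat → PySem.Set (Int × Int) → PySem.Set (Int × Int) → Int → Int
  | 0, _, _, steps => steps - 1
  | fuel + 1, seen, todo, steps =>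
    if (PySem.Set.diff treesS seen).isEmpty then steps - 1
    else
      let seen' := PySem.Set.update seen todo
      pvLoopA canalS treesS fuel seen' (pvNextTodo canalS seen' todo) (steps + 1)

def simple_flood_fill (canal : List (Int × Int)) (trees : List (Int × Int)) (todo : List (Int × Int)) : Int :=
  pvLoopA (PySem.Set.ofList canal) (PySem.Set.ofList trees) (canal.length + 2)
    PySem.Set.empty (PySem.Set.ofList todo) 0

-- ===== PORT B =====
-- the inner `for nbr in (...)` of Source B: state = (dist, queue)
def pvVisit (canalS : PySem.Set (Int × Int)) (d : Int) (ns : List (Int × Int))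
    (st : PySem.Dict (Int × Int) Int × List (Int × Int)) :
    PySem.Dict (Int × Int) Int × List (Int × Int) :=
  ns.foldl
    (fun st n =>
      if PySem.Set.contains canalS n && !(st.1.contains n) then (st.1.insert n (d + 1), st.2 ++ [n])
      else st)
    st

-- Source B's `while i < len(queue)` pointer loop: popping queue[i] = processing the head of the
-- unread suffix, appends go to its end. The fuel todo.length + canal.length + 1 always
-- suffices (each pop removes one queued node and every append inserts a fresh canal key),
-- proved below, so the fuel branch is unreachable.
def pvLoopB (canalS : PySem.Set (Int × Int)) :
    Nat → PySem.Dict (Int × Int) Int → List (Int × Int) → PySem.Dict (Int × Int) Int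
  | 0, dist, _ => dist
  | _ + 1, dist, [] => dist
  | fuel + 1, dist, p :: rest =>
    -- dist[node]: the key is always present (sources and enqueued nodes were inserted first)
    let d := (dist.get? p).getD 0
    let st := pvVisit canalS d (pvNbrs p) (dist, rest)
    pvLoopB canalS fuel st.1 st.2

def simple_flood_fill_alt (canal : List (Int × Int)) (trees : List (Int × Int)) (todo : List (Int × Int)) : Int :=
  let todoS := PySem.Set.ofList todo
  let dist0 := todoS.foldl (fun d s => PySem.Dict.insert d s 0) PySem.Dict.empty
  let dist := pvLoopB (PySem.Set.ofList canal) (todo.length + canal.length + 1) dist0 todoS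
  -- max((dist[t] for t in trees), default=-1): all stored distances are ≥ 0, so folding max
  -- from -1 is that max; under Pre_ every tree is a key (Python's KeyError is outside Pre_)
  (PySem.Set.ofList trees).foldl (fun acc t => max acc ((PySem.Dict.get? dist t).getD (-1))) (-1)

-- ===== PRECONDITION & SPEC =====
-- one saturation step: add every canal-neighbour of the current region
def pvGrow (canalS S : PySem.Set (Int × Int)) : PySem.Set (Int × Int) :=
  S.foldl
    (fun acc p => (pvNbrs p).foldl
      (fun acc n => if PySem.Set.contains canalS n then PySem.Set.add acc n else acc) acc)
    S

-- all points reachable from the sources through the canal (canal.length + 1 saturation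
-- steps reach the fixpoint, since each growing step adds at least one canal element)
def pvReach (canal todo : List (Int × Int)) : PySem.Set (Int × Int) :=
  (pvGrow (PySem.Set.ofList canal))^[canal.length + 1] (PySem.Set.ofList todo)

-- Pre_ excludes exactly the inputs with a tree unreachable from the sources through the
-- canal: there Python A's while-loop never terminates (and Python B's max raises KeyError).
def Pre_simple_flood_fill (canal : List (Int × Int)) (trees : List (Int × Int)) (todo : List (Int × Int)) : Prop :=
  ∀ t ∈ trees, t ∈ pvReach canal todo
instance (canal : List (Int × Int)) (trees : List (Int × Int)) (todo : List (Int × Int)) : Decidable (Pre_simple_flood_fill canal trees todo) := by unfold Pre_simple_flood_fill; infer_instance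

def pvWitness_simple_flood_fill : (List (Int × Int)) × (List (Int × Int)) × (List (Int × Int)) :=
  ([(0, 1), (0, 2)], [(0, 2)], [(0, 0)])

def Spec_simple_flood_fill (canal : List (Int × Int)) (trees : List (Int × Int)) (todo : List (Int × Int)) (out : Int) : Prop := out = simple_flood_fill_alt canal trees todo
instance (canal : List (Int × Int)) (trees : List (Int × Int)) (todo : List (Int × Int)) (out : Int) : Decidable (Spec_simple_flood_fill canal trees todo out) := by unfold Spec_simple_flood_fill; infer_instance

-- ===== CLAIM (what is proved, stated in full; the proofs are below) =====
def Claim_equal_simple_flood_fill : Prop := ∀ (canal : List (Int × Int)) (trees : List (Int × Int)) (todo : List (Int × Int)), Dom_simple_flood_fill canal trees todo → Pre_simple_flood_fill canal trees todo → Spec_simple_flood_fill canal trees todo (simple_flood_fill canal trees todo)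

-- ===== LEMMAS AND PROOFS =====

-- (seen_k, todo_k): A's loop state after k iterations = the BFS layers
def pvLayers (canalS todoS : PySem.Set (Int × Int)) : Nat → PySem.Set (Int × Int) × PySem.Set (Int × Int)
  | 0 => (PySem.Set.empty, todoS)
  | k + 1 =>
    let s := pvLayers canalS todoS k
    (PySem.Set.update s.1 s.2, pvNextTodo canalS (PySem.Set.update s.1 s.2) s.2)

def pvSeen (canalS todoS : PySem.Set (Int × Int)) (k : Nat) : PySem.Set (Int × Int) :=
  (pvLayers canalS todoS k).1

def pvFront (canalS todoS : PySem.Set (Int × Int)) (k : Nat) : PySem.Set (Int × Int) :=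
  (pvLayers canalS todoS k).2

theorem pvSeen_zero (c t : PySem.Set (Int × Int)) : pvSeen c t 0 = PySem.Set.empty := rfl
theorem pvFront_zero (c t : PySem.Set (Int × Int)) : pvFront c t 0 = t := rfl
theorem pvSeen_succ (c t : PySem.Set (Int × Int)) (k : Nat) :
    pvSeen c t (k + 1) = PySem.Set.update (pvSeen c t k) (pvFront c t k) := rfl
theorem pvFront_succ (c t : PySem.Set (Int × Int)) (k : Nat) :
    pvFront c t (k + 1) = pvNextTodo c (pvSeen c t (k + 1)) (pvFront c t k) := rfl

-- membership in the two nested conditional-add folds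
theorem mem_foldl_addIf (c : (Int × Int) → Bool) :
    ∀ (l : List (Int × Int)) (acc : PySem.Set (Int × Int)) (v : Int × Int),
      (v ∈ l.foldl (fun acc n => if c n then PySem.Set.add acc n else acc) acc ↔
        v ∈ acc ∨ (v ∈ l ∧ c v = true))
  | [], acc, v => by simp
  | n :: l, acc, v => by
    simp only [List.foldl_cons]
    rw [mem_foldl_addIf c l]
    by_cases hn : c n = true
    · simp only [hn, if_pos]
      rw [PySem.Set.mem_add]
      constructor
      · rintro ((h | rfl) | h)
        · exact Or.inl h
        · exact Or.inr ⟨List.mem_cons_self, hn⟩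
        · exact Or.inr ⟨List.mem_cons_of_mem _ h.1, h.2⟩
      · rintro (h | ⟨hm, hc⟩)
        · exact Or.inl (Or.inl h)
        · rcases List.mem_cons.1 hm with rfl | hm
          · exact Or.inl (Or.inr rfl)
          · exact Or.inr ⟨hm, hc⟩
    · simp only [hn, if_neg, Bool.false_eq_true, not_false_iff]
      constructor
      · rintro (h | h)
        · exact Or.inl h
        · exact Or.inr ⟨List.mem_cons_of_mem _ h.1, h.2⟩
      · rintro (h | ⟨hm, hc⟩)
        · exact Or.inl h
        · rcases List.mem_cons.1 hm with rfl | hm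
          · exact absurd hc hn
          · exact Or.inr ⟨hm, hc⟩

theorem mem_foldl_nbrsIf (c : (Int × Int) → Bool) :
    ∀ (l : List (Int × Int)) (acc : PySem.Set (Int × Int)) (v : Int × Int),
      (v ∈ l.foldl
          (fun acc p => (pvNbrs p).foldl (fun acc n => if c n then PySem.Set.add acc n else acc) acc)
          acc ↔ v ∈ acc ∨ ((∃ u ∈ l, v ∈ pvNbrs u) ∧ c v = true))
  | [], acc, v => by simp
  | p :: l, acc, v => by
    simp only [List.foldl_cons]
    rw [mem_foldl_nbrsIf c l, mem_foldl_addIf c]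
    constructor
    · rintro ((h | ⟨hm, hc⟩) | ⟨⟨u, hu, hv⟩, hc⟩)
      · exact Or.inl h
      · exact Or.inr ⟨⟨p, List.mem_cons_self, hm⟩, hc⟩
      · exact Or.inr ⟨⟨u, List.mem_cons_of_mem _ hu, hv⟩, hc⟩
    · rintro (h | ⟨⟨u, hu, hv⟩, hc⟩)
      · exact Or.inl (Or.inl h)
      · rcases List.mem_cons.1 hu with rfl | hu
        · exact Or.inl (Or.inr ⟨hv, hc⟩)
        · exact Or.inr ⟨⟨u, hu, hv⟩, hc⟩

theorem mem_pvNextTodo (canalS seen' todo : PySem.Set (Int × Int)) (v : Int × Int) :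
    v ∈ pvNextTodo canalS seen' todo ↔
      (∃ u ∈ todo, v ∈ pvNbrs u) ∧ v ∈ canalS ∧ v ∉ seen' := by
  unfold pvNextTodo
  rw [mem_foldl_nbrsIf]
  simp [PySem.Set.empty, Bool.and_eq_true, PySem.Set.contains_iff, and_assoc]

theorem mem_pvGrow (canalS S : PySem.Set (Int × Int)) (v : Int × Int) :
    v ∈ pvGrow canalS S ↔ v ∈ S ∨ ((∃ u ∈ S, v ∈ pvNbrs u) ∧ v ∈ canalS) := by
  unfold pvGrow
  rw [mem_foldl_nbrsIf]
  simp [PySem.Set.contains_iff]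

theorem mem_pvSeen_iff (c t : PySem.Set (Int × Int)) :
    ∀ (m : Nat) (v : Int × Int), v ∈ pvSeen c t m ↔ ∃ j < m, v ∈ pvFront c t j
  | 0, v => by simp [pvSeen_zero, PySem.Set.empty]
  | m + 1, v => by
    rw [pvSeen_succ, PySem.Set.mem_update, mem_pvSeen_iff c t m]
    constructor
    · rintro (⟨j, hj, hv⟩ | hv)
      · exact ⟨j, Nat.lt_succ_of_lt hj, hv⟩
      · exact ⟨m, Nat.lt_succ_self _, hv⟩
    · rintro ⟨j, hj, hv⟩
      rcases Nat.lt_succ_iff_lt_or_eq.1 hj with hj | rfl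
      · exact Or.inl ⟨j, hj, hv⟩
      · exact Or.inr hv

theorem pvSeen_mono (c t : PySem.Set (Int × Int)) {j m : Nat} (h : j ≤ m) {v : Int × Int}
    (hv : v ∈ pvSeen c t j) : v ∈ pvSeen c t m := by
  rw [mem_pvSeen_iff] at hv ⊢
  obtain ⟨i, hi, hv⟩ := hv
  exact ⟨i, lt_of_lt_of_le hi h, hv⟩

theorem pvFront_subset_seen (c t : PySem.Set (Int × Int)) {j m : Nat} (h : j < m) {v : Int × Int}
    (hv : v ∈ pvFront c t j) : v ∈ pvSeen c t m := by
  rw [mem_pvSeen_iff]; exact ⟨j, h, hv⟩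

theorem pvFront_not_seen (c t : PySem.Set (Int × Int)) {k : Nat} {v : Int × Int}
    (hv : v ∈ pvFront c t (k + 1)) : v ∉ pvSeen c t (k + 1) := by
  rw [pvFront_succ, mem_pvNextTodo] at hv
  exact hv.2.2

theorem pvFront_canal (c t : PySem.Set (Int × Int)) {k : Nat} {v : Int × Int}
    (hv : v ∈ pvFront c t (k + 1)) : v ∈ c := by
  rw [pvFront_succ, mem_pvNextTodo] at hv
  exact hv.2.1

theorem pvFront_empty_ge (c t : PySem.Set (Int × Int)) {m : Nat}
    (h : ∀ v, v ∉ pvFront c t m) : ∀ j, m ≤ j → ∀ v, v ∉ pvFront c t j := by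
  intro j
  induction j with
  | zero =>
    intro hj
    have : m = 0 := Nat.le_zero.1 hj
    subst this; exact h
  | succ j ih =>
    intro hj
    rcases Nat.lt_or_ge m (j + 1) with hlt | hge
    · have hj' : m ≤ j := Nat.lt_succ_iff.1 hlt
      intro v hv
      rw [pvFront_succ, mem_pvNextTodo] at hv
      obtain ⟨u, hu, _⟩ := hv.1
      exact ih hj' u hu
    · have : m = j + 1 := le_antisymm hj hge
      subst this; exact h

theorem pvClose (c t : PySem.Set (Int × Int)) {j : Nat} {u v : Int × Int}
    (hu : u ∈ pvFront c t j) (hv : v ∈ pvNbrs u) (hc : v ∈ c) :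
    v ∈ pvSeen c t (j + 2) := by
  by_cases hs : v ∈ pvSeen c t (j + 1)
  · exact pvSeen_mono c t (by omega) hs
  · apply pvFront_subset_seen c t (Nat.lt_succ_self _)
    rw [pvFront_succ, mem_pvNextTodo]
    exact ⟨⟨u, hu, hv⟩, hc, hs⟩

-- the saturation iterate used by Pre_ agrees with A's seen-regions
theorem mem_iter_pvGrow (c t : PySem.Set (Int × Int)) :
    ∀ (k : Nat) (v : Int × Int), v ∈ (pvGrow c)^[k] t ↔ v ∈ pvSeen c t (k + 1)
  | 0, v => by
    rw [pvSeen_succ, PySem.Set.mem_update, pvFront_zero, pvSeen_zero]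
    simp [PySem.Set.empty]
  | k + 1, v => by
    rw [Function.iterate_succ_apply', mem_pvGrow]
    constructor
    · rintro (h | ⟨⟨u, hu, hv⟩, hc⟩)
      · exact pvSeen_mono c t (by omega) ((mem_iter_pvGrow c t k v).mp h)
      · have hu' : u ∈ pvSeen c t (k + 1) := (mem_iter_pvGrow c t k u).mp hu
        rw [mem_pvSeen_iff] at hu'
        obtain ⟨j, hj, hu'⟩ := hu'
        exact pvSeen_mono c t (by omega) (pvClose c t hu' hv hc)
    · intro h
      rw [mem_pvSeen_iff] at h
      obtain ⟨j, hj, hv⟩ := h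
      rcases Nat.lt_or_ge j (k + 1) with hjk | hjk
      · exact Or.inl ((mem_iter_pvGrow c t k v).mpr (pvFront_subset_seen c t hjk hv))
      · have hj' : j = k + 1 := by omega
        subst hj'
        have hv' := hv
        rw [pvFront_succ, mem_pvNextTodo] at hv'
        obtain ⟨⟨u, hu, hnb⟩, hc, _⟩ := hv'
        refine Or.inr ⟨⟨u, ?_, hnb⟩, hc⟩
        exact (mem_iter_pvGrow c t k u).mpr (pvFront_subset_seen c t (Nat.lt_succ_self _) hu)

-- the emptiness test of A's while condition
theorem diff_isEmpty_iff (s t : PySem.Set (Int × Int)) :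
    (PySem.Set.diff s t).isEmpty = true ↔ ∀ x ∈ s, x ∈ t := by
  rw [List.isEmpty_iff]
  constructor
  · intro h x hx
    by_contra hnx
    have hmem : x ∈ PySem.Set.diff s t := (PySem.Set.mem_diff _ _ _).2 ⟨hx, hnx⟩
    rw [h] at hmem
    simp at hmem
  · intro h
    apply List.eq_nil_iff_forall_not_mem.2
    intro x hx
    rw [PySem.Set.mem_diff] at hx
    exact hx.2 (h x hx.1)

-- A's loop, run from layer state k, exits after exactly the least number of further rounds
theorem loopA_run (canalS treesS todoS : PySem.Set (Int × Int)) :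
    ∀ (n fuel k : Nat) (steps : Int), n ≤ fuel →
      (∀ x ∈ treesS, x ∈ pvSeen canalS todoS (k + n)) →
      (∀ j, j < n → ∃ x ∈ treesS, x ∉ pvSeen canalS todoS (k + j)) →
      pvLoopA canalS treesS fuel (pvSeen canalS todoS k) (pvFront canalS todoS k) steps =
        steps + n - 1
  | 0, fuel, k, steps, hf, hall, _ => by
    cases fuel with
    | zero => simp [pvLoopA]
    | succ f =>
      have hemp : (PySem.Set.diff treesS (pvSeen canalS todoS k)).isEmpty = true :=
        (diff_isEmpty_iff _ _).2 (by simpa using hall)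
      simp [pvLoopA, hemp]
  | n + 1, fuel, k, steps, hf, hall, hmiss => by
    cases fuel with
    | zero => omega
    | succ f =>
      have hne : ¬ (PySem.Set.diff treesS (pvSeen canalS todoS k)).isEmpty = true := by
        rw [diff_isEmpty_iff]
        intro h
        obtain ⟨x, hx, hnx⟩ := hmiss 0 (Nat.succ_pos _)
        exact hnx (by simpa using h x hx)
      simp only [pvLoopA, hne, if_neg, Bool.false_eq_true, not_false_iff, if_false]
      rw [← pvSeen_succ, ← pvFront_succ]
      have hrec := loopA_run canalS treesS todoS n f (k + 1) (steps + 1) (by omega)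
        (by intro x hx; have h := hall x hx
            rwa [show k + (n + 1) = (k + 1) + n by omega] at h)
        (by intro j hj
            obtain ⟨x, hx, hnx⟩ := hmiss (j + 1) (by omega)
            refine ⟨x, hx, ?_⟩
            rwa [show k + (j + 1) = (k + 1) + j by omega] at hnx)
      rw [hrec]
      push_cast
      ring

-- ===== B-side lemmas =====

def pvCdiff (canalS : PySem.Set (Int × Int)) (dist : PySem.Dict (Int × Int) Int) : Nat :=
  (canalS.filter (fun v => !(dist.contains v))).length

theorem pvCdiff_filter_insert (dist : PySem.Dict (Int × Int) Int) (n : Int × Int) (w : Int) :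
    ∀ (l : List (Int × Int)), l.Nodup → n ∈ l → dist.contains n = false →
      (l.filter (fun v => !((dist.insert n w).contains v))).length + 1 =
        (l.filter (fun v => !(dist.contains v))).length
  | [], _, hn, _ => by simp at hn
  | h :: l, hnd, hn, hc => by
    have hnd' : l.Nodup := (List.nodup_cons.1 hnd).2
    by_cases hh : h = n
    · subst hh
      have hnotin : h ∉ l := (List.nodup_cons.1 hnd).1
      have h1 : ((dist.insert h w).contains h) = true := PySem.Dict.contains_insert_self _ _ _
      have heq : l.filter (fun v => !((dist.insert h w).contains v)) =
          l.filter (fun v => !(dist.contains v)) := by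
        apply List.filter_congr
        intro v hv
        have hvn : v ≠ h := fun e => hnotin (e ▸ hv)
        rw [PySem.Dict.contains_insert]
        simp [hvn]
      simp [List.filter_cons, h1, hc, heq]
    · have hn' : n ∈ l := by
        rcases List.mem_cons.1 hn with e | e
        · exact absurd e.symm hh
        · exact e
      have ih := pvCdiff_filter_insert dist n w l hnd' hn' hc
      have hsame : ((dist.insert n w).contains h) = dist.contains h := by
        rw [PySem.Dict.contains_insert]
        simp [hh]
      rw [List.filter_cons, List.filter_cons, hsame]
      by_cases hch : dist.contains h = true <;> simp only [hch, Bool.not_true, Bool.not_false,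
        Bool.false_eq_true, if_neg, if_pos, if_false, if_true, not_false_iff,
        List.length_cons] <;> omega

theorem pvCdiff_insert (canalS : PySem.Set (Int × Int)) (hcnd : canalS.Nodup)
    (dist : PySem.Dict (Int × Int) Int) (n : Int × Int) (w : Int) (hmem : n ∈ canalS)
    (hfresh : dist.contains n = false) :
    pvCdiff canalS (dist.insert n w) + 1 = pvCdiff canalS dist :=
  pvCdiff_filter_insert dist n w canalS hcnd hmem hfresh

-- the inner neighbour fold of B's loop keeps the BFS invariant
theorem visit_inv (canalS todoS : PySem.Set (Int × Int)) (hcnd : canalS.Nodup) (k : Nat)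
    (p : Int × Int) (hp : p ∈ pvFront canalS todoS k) (l1' : List (Int × Int)) :
    ∀ (ns : List (Int × Int)), (∀ x ∈ ns, x ∈ pvNbrs p) →
    ∀ (dist : PySem.Dict (Int × Int) Int) (l2 : List (Int × Int)),
      (∀ v ∈ l2, v ∈ pvFront canalS todoS (k + 1)) →
      (∀ v, dist.contains v = true ↔ (v ∈ pvSeen canalS todoS (k + 1) ∨ v ∈ l2)) →
      (∀ v j, j ≤ k + 1 → v ∈ pvFront canalS todoS j → dist.contains v = true →
        dist.get? v = some (j : Int)) →
      (∀ v, v ∈ pvFront canalS todoS (k + 1) → v ∈ pvNbrs p → (v ∈ ns ∨ v ∈ l2)) →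
      ∃ dist' l2',
        pvVisit canalS (k : Int) ns (dist, l1' ++ l2) = (dist', l1' ++ l2') ∧
        (∀ v ∈ l2', v ∈ pvFront canalS todoS (k + 1)) ∧
        (∀ v, dist'.contains v = true ↔ (v ∈ pvSeen canalS todoS (k + 1) ∨ v ∈ l2')) ∧
        (∀ v j, j ≤ k + 1 → v ∈ pvFront canalS todoS j → dist'.contains v = true →
          dist'.get? v = some (j : Int)) ∧
        (∀ v, v ∈ pvFront canalS todoS (k + 1) → v ∈ pvNbrs p → v ∈ l2') ∧
        (∀ v ∈ l2, v ∈ l2') ∧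
        ((l1' ++ l2').length + pvCdiff canalS dist' = (l1' ++ l2).length + pvCdiff canalS dist)
  | [], _, dist, l2, A1, A2, A3, A4 => by
    refine ⟨dist, l2, rfl, A1, A2, A3, ?_, fun v hv => hv, rfl⟩
    intro v hv hnb
    rcases A4 v hv hnb with h | h
    · simp at h
    · exact h
  | n :: ns, hns, dist, l2, A1, A2, A3, A4 => by
    have hns' : ∀ x ∈ ns, x ∈ pvNbrs p := fun x hx => hns x (List.mem_cons_of_mem _ hx)
    have hnnb : n ∈ pvNbrs p := hns n List.mem_cons_self
    by_cases hcond : (PySem.Set.contains canalS n && !(dist.contains n)) = true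
    · -- n is a fresh canal node: insert it at distance k+1 and enqueue it
      rw [Bool.and_eq_true, Bool.not_eq_true'] at hcond
      obtain ⟨hcanal, hfresh⟩ := hcond
      have hcanal' : n ∈ canalS := (PySem.Set.contains_iff _ _).1 hcanal
      have hnk : ¬ (n ∈ pvSeen canalS todoS (k + 1) ∨ n ∈ l2) := by
        intro h
        rw [← A2 n, hfresh] at h
        simp at h
      push_neg at hnk
      have hnF : n ∈ pvFront canalS todoS (k + 1) := by
        rw [pvFront_succ, mem_pvNextTodo]
        exact ⟨⟨p, hp, hnnb⟩, hcanal', hnk.1⟩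
      have hstep : pvVisit canalS (k : Int) (n :: ns) (dist, l1' ++ l2) =
          pvVisit canalS (k : Int) ns (dist.insert n ((k : Int) + 1), l1' ++ (l2 ++ [n])) := by
        unfold pvVisit
        simp only [List.foldl_cons, hcanal, hfresh, Bool.not_false, Bool.and_self, if_pos,
          List.append_assoc]
      rw [hstep]
      have A1₂ : ∀ v ∈ l2 ++ [n], v ∈ pvFront canalS todoS (k + 1) := by
        intro v hv
        rcases List.mem_append.1 hv with h | h
        · exact A1 v h
        · rw [List.mem_singleton] at h; subst h; exact hnF
      have A2₂ : ∀ v, (dist.insert n ((k : Int) + 1)).contains v = true ↔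
          (v ∈ pvSeen canalS todoS (k + 1) ∨ v ∈ l2 ++ [n]) := by
        intro v
        rw [PySem.Dict.contains_insert, Bool.or_eq_true, beq_iff_eq, A2 v]
        simp only [List.mem_append, List.mem_singleton]
        tauto
      have A3₂ : ∀ v j, j ≤ k + 1 → v ∈ pvFront canalS todoS j →
          (dist.insert n ((k : Int) + 1)).contains v = true →
          (dist.insert n ((k : Int) + 1)).get? v = some (j : Int) := by
        intro v j hj hvj hcont
        by_cases hvn : v = n
        · subst hvn
          have hjk : j = k + 1 := by
            by_contra hne
            have hjlt : j < k + 1 := by omega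
            exact hnk.1 (pvFront_subset_seen canalS todoS hjlt hvj)
          subst hjk
          rw [PySem.Dict.get?_insert_self]
          push_cast
          ring_nf
        · rw [PySem.Dict.get?_insert_of_ne _ _ hvn]
          apply A3 v j hj hvj
          rw [PySem.Dict.contains_insert, Bool.or_eq_true, beq_iff_eq] at hcont
          rcases hcont with h | h
          · exact absurd h hvn
          · exact h
      have A4₂ : ∀ v, v ∈ pvFront canalS todoS (k + 1) → v ∈ pvNbrs p →
          (v ∈ ns ∨ v ∈ l2 ++ [n]) := by
        intro v hv hnb
        rcases A4 v hv hnb with h | h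
        · rcases List.mem_cons.1 h with rfl | h
          · exact Or.inr (List.mem_append.2 (Or.inr (List.mem_singleton.2 rfl)))
          · exact Or.inl h
        · exact Or.inr (List.mem_append.2 (Or.inl h))
      obtain ⟨dist', l2', heq, B1, B2, B3, B4, B5, B6⟩ :=
        visit_inv canalS todoS hcnd k p hp l1' ns hns' (dist.insert n ((k : Int) + 1))
          (l2 ++ [n]) A1₂ A2₂ A3₂ A4₂
      refine ⟨dist', l2', heq, B1, B2, B3, B4, ?_, ?_⟩
      · intro v hv
        exact B5 v (List.mem_append.2 (Or.inl hv))
      · have hcd := pvCdiff_insert canalS hcnd dist n ((k : Int) + 1) hcanal' hfresh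
        simp only [List.length_append, List.length_cons, List.length_nil] at B6 ⊢
        omega
    · -- n already known or not a canal node: state unchanged
      have hstep : pvVisit canalS (k : Int) (n :: ns) (dist, l1' ++ l2) =
          pvVisit canalS (k : Int) ns (dist, l1' ++ l2) := by
        unfold pvVisit
        simp only [List.foldl_cons, hcond, if_neg, Bool.false_eq_true, not_false_iff, if_false]
      rw [hstep]
      apply visit_inv canalS todoS hcnd k p hp l1' ns hns' dist l2 A1 A2 A3
      intro v hv hnb
      rcases A4 v hv hnb with h | h
      · rcases List.mem_cons.1 h with rfl | h
        · have hc : v ∈ canalS := pvFront_canal canalS todoS hv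
          have hct : dist.contains v = true := by
            by_contra hcc
            apply hcond
            rw [Bool.and_eq_true, Bool.not_eq_true']
            exact ⟨(PySem.Set.contains_iff _ _).2 hc, by simpa using hcc⟩
          rcases (A2 v).1 hct with hs | hl
          · exact absurd hs (pvFront_not_seen canalS todoS hv)
          · exact Or.inr hl
        · exact Or.inl h
      · exact Or.inr h

-- when the queue has emptied, the dict holds exactly the BFS distances
theorem loopB_finish (canalS todoS : PySem.Set (Int × Int)) (k : Nat)
    (dist : PySem.Dict (Int × Int) Int)
    (A2 : ∀ v, dist.contains v = true ↔ v ∈ pvSeen canalS todoS (k + 1))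
    (A3 : ∀ v j, j ≤ k + 1 → v ∈ pvFront canalS todoS j → dist.contains v = true →
      dist.get? v = some (j : Int))
    (hemp : ∀ v, v ∉ pvFront canalS todoS (k + 1)) :
    ∀ v j, v ∈ pvFront canalS todoS j → dist.get? v = some (j : Int) := by
  intro v j hv
  rcases Nat.lt_or_ge j (k + 1) with hj | hj
  · exact A3 v j (by omega) hv ((A2 v).2 (pvFront_subset_seen canalS todoS hj hv))
  · exact absurd hv (pvFront_empty_ge canalS todoS hemp j hj v)

-- one popped node, given the induction hypothesis for the remaining fuel
theorem loopB_step (canalS todoS : PySem.Set (Int × Int)) (hcnd : canalS.Nodup) (f : Nat)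
    (hIH : ∀ (dist : PySem.Dict (Int × Int) Int) (k : Nat) (l1 l2 : List (Int × Int)),
      (∀ v ∈ l1, v ∈ pvFront canalS todoS k) →
      (∀ v ∈ l2, v ∈ pvFront canalS todoS (k + 1)) →
      (∀ v, dist.contains v = true ↔ (v ∈ pvSeen canalS todoS (k + 1) ∨ v ∈ l2)) →
      (∀ v j, j ≤ k + 1 → v ∈ pvFront canalS todoS j → dist.contains v = true →
        dist.get? v = some (j : Int)) →
      (∀ v, v ∈ pvFront canalS todoS (k + 1) → (v ∈ l2 ∨ ∃ u ∈ l1, v ∈ pvNbrs u)) →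
      (l1 ++ l2).length + pvCdiff canalS dist ≤ f →
      ∀ v j, v ∈ pvFront canalS todoS j →
        (pvLoopB canalS f dist (l1 ++ l2)).get? v = some (j : Int))
    (dist : PySem.Dict (Int × Int) Int) (k : Nat) (p : Int × Int) (l1s l2 : List (Int × Int))
    (H1 : ∀ v ∈ p :: l1s, v ∈ pvFront canalS todoS k)
    (H2 : ∀ v ∈ l2, v ∈ pvFront canalS todoS (k + 1))
    (H3 : ∀ v, dist.contains v = true ↔ (v ∈ pvSeen canalS todoS (k + 1) ∨ v ∈ l2))
    (H4 : ∀ v j, j ≤ k + 1 → v ∈ pvFront canalS todoS j → dist.contains v = true →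
      dist.get? v = some (j : Int))
    (H5 : ∀ v, v ∈ pvFront canalS todoS (k + 1) → (v ∈ l2 ∨ ∃ u ∈ p :: l1s, v ∈ pvNbrs u))
    (hfuel : ((p :: l1s) ++ l2).length + pvCdiff canalS dist ≤ f + 1) :
    ∀ v j, v ∈ pvFront canalS todoS j →
      (pvLoopB canalS (f + 1) dist ((p :: l1s) ++ l2)).get? v = some (j : Int) := by
  have hp : p ∈ pvFront canalS todoS k := H1 p List.mem_cons_self
  have hpd : (dist.get? p).getD 0 = (k : Int) := by
    have hcont : dist.contains p = true :=
      (H3 p).2 (Or.inl (pvFront_subset_seen canalS todoS (Nat.lt_succ_self k) hp))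
    rw [H4 p k (by omega) hp hcont]
    rfl
  obtain ⟨dist', l2', heq, B1, B2, B3, B4, B5, B6⟩ :=
    visit_inv canalS todoS hcnd k p hp l1s (pvNbrs p) (fun x hx => hx) dist l2 H2 H3 H4
      (fun v _ hnb => Or.inl hnb)
  intro v j hv
  have hloop : pvLoopB canalS (f + 1) dist ((p :: l1s) ++ l2) =
      pvLoopB canalS f dist' (l1s ++ l2') := by
    show pvLoopB canalS (f + 1) dist (p :: (l1s ++ l2)) = _
    simp only [pvLoopB, hpd, heq]
  rw [hloop]
  apply hIH dist' k l1s l2' (fun v hv => H1 v (List.mem_cons_of_mem _ hv)) B1 B2 B3 _ _ v j hv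
  · intro w hw
    rcases H5 w hw with h | ⟨u, hu, hnb⟩
    · exact Or.inl (B5 w h)
    · rcases List.mem_cons.1 hu with rfl | hu
      · exact Or.inl (B4 w hw hnb)
      · exact Or.inr ⟨u, hu, hnb⟩
  · have hlen : (l1s ++ l2').length + pvCdiff canalS dist' =
        (l1s ++ l2).length + pvCdiff canalS dist := B6
    simp only [List.length_append, List.length_cons] at hfuel hlen ⊢
    omega

-- the whole queue loop computes BFS distances
theorem loopB_run (canalS todoS : PySem.Set (Int × Int)) (hcnd : canalS.Nodup) :
    ∀ (fuel : Nat) (dist : PySem.Dict (Int × Int) Int) (k : Nat) (l1 l2 : List (Int × Int)),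
      (∀ v ∈ l1, v ∈ pvFront canalS todoS k) →
      (∀ v ∈ l2, v ∈ pvFront canalS todoS (k + 1)) →
      (∀ v, dist.contains v = true ↔ (v ∈ pvSeen canalS todoS (k + 1) ∨ v ∈ l2)) →
      (∀ v j, j ≤ k + 1 → v ∈ pvFront canalS todoS j → dist.contains v = true →
        dist.get? v = some (j : Int)) →
      (∀ v, v ∈ pvFront canalS todoS (k + 1) → (v ∈ l2 ∨ ∃ u ∈ l1, v ∈ pvNbrs u)) →
      (l1 ++ l2).length + pvCdiff canalS dist ≤ fuel →
      ∀ v j, v ∈ pvFront canalS todoS j →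
        (pvLoopB canalS fuel dist (l1 ++ l2)).get? v = some (j : Int)
  | 0, dist, k, l1, l2, H1, H2, H3, H4, H5, hfuel => by
    have h1 : l1 = [] := by
      cases l1 with
      | nil => rfl
      | cons a l => simp at hfuel
    have h2 : l2 = [] := by
      subst h1
      cases l2 with
      | nil => rfl
      | cons a l => simp at hfuel
    subst h1; subst h2
    intro v j hv
    show (pvLoopB canalS 0 dist []).get? v = some (j : Int)
    simp only [pvLoopB]
    refine loopB_finish canalS todoS k dist ?_ H4 ?_ v j hv
    · intro w
      rw [H3 w]
      simp
    · intro w hw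
      rcases H5 w hw with h | ⟨u, hu, _⟩
      · simp at h
      · simp at hu
  | fuel + 1, dist, k, l1, l2, H1, H2, H3, H4, H5, hfuel => by
    cases l1 with
    | cons p l1s =>
      exact loopB_step canalS todoS hcnd fuel
        (fun dist k l1 l2 => loopB_run canalS todoS hcnd fuel dist k l1 l2)
        dist k p l1s l2 H1 H2 H3 H4 H5 hfuel
    | nil =>
      -- the current ring is exhausted: reinterpret the queue as the next ring
      have H1' : ∀ v ∈ l2, v ∈ pvFront canalS todoS (k + 1) := H2
      have hl2full : ∀ v, v ∈ pvFront canalS todoS (k + 1) → v ∈ l2 := by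
        intro v hv
        rcases H5 v hv with h | ⟨u, hu, _⟩
        · exact h
        · simp at hu
      have H3' : ∀ v, dist.contains v = true ↔
          (v ∈ pvSeen canalS todoS (k + 2) ∨ v ∈ ([] : List (Int × Int))) := by
        intro v
        rw [H3 v, pvSeen_succ canalS todoS (k + 1), PySem.Set.mem_update]
        constructor
        · rintro (h | h)
          · exact Or.inl (Or.inl h)
          · exact Or.inl (Or.inr (H2 v h))
        · rintro ((h | h) | h)
          · exact Or.inl h
          · exact Or.inr (hl2full v h)
          · simp at h
      have H4' : ∀ v j, j ≤ k + 2 → v ∈ pvFront canalS todoS j → dist.contains v = true →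
          dist.get? v = some (j : Int) := by
        intro v j hj hvj hcont
        rcases Nat.lt_or_ge j (k + 2) with hj' | hj'
        · exact H4 v j (by omega) hvj hcont
        · have hj2 : j = k + 2 := by omega
          subst hj2
          exfalso
          apply pvFront_not_seen canalS todoS hvj
          rcases (H3 v).1 hcont with h | h
          · exact pvSeen_mono canalS todoS (by omega) h
          · exact pvFront_subset_seen canalS todoS (Nat.lt_succ_self _) (H2 v h)
      have H5' : ∀ v, v ∈ pvFront canalS todoS (k + 2) →
          (v ∈ ([] : List (Int × Int)) ∨ ∃ u ∈ l2, v ∈ pvNbrs u) := by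
        intro v hv
        have hv' := hv
        rw [pvFront_succ, mem_pvNextTodo] at hv'
        obtain ⟨⟨u, hu, hnb⟩, _, _⟩ := hv'
        exact Or.inr ⟨u, hl2full u hu, hnb⟩
      cases l2 with
      | nil =>
        intro v j hv
        show (pvLoopB canalS (fuel + 1) dist []).get? v = some (j : Int)
        simp only [pvLoopB]
        refine loopB_finish canalS todoS k dist ?_ H4 ?_ v j hv
        · intro w
          rw [H3 w]
          simp
        · intro w hw
          rcases H5 w hw with h | ⟨u, hu, _⟩
          · simp at h
          · simp at hu
      | cons q l2s =>
        have := loopB_step canalS todoS hcnd fuel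
          (fun dist k l1 l2 => loopB_run canalS todoS hcnd fuel dist k l1 l2)
          dist (k + 1) q l2s [] H1' (by intro v hv; simp at hv) H3' H4' H5'
          (by simpa using hfuel)
        intro v j hv
        have hres := this v j hv
        simpa using hres

-- the initial dict {s: 0 for s in todo}
theorem get?_foldl_insert_zero (v : Int × Int) :
    ∀ (l : List (Int × Int)) (d : PySem.Dict (Int × Int) Int),
      (l.foldl (fun d s => d.insert s 0) d).get? v = if v ∈ l then some 0 else d.get? v
  | [], d => by simp
  | s :: l, d => by
    rw [List.foldl_cons, get?_foldl_insert_zero v l]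
    by_cases hv : v ∈ l
    · simp [hv, List.mem_cons]
    · by_cases hvs : v = s
      · subst hvs
        simp [hv, PySem.Dict.get?_insert_self]
      · simp [hv, hvs, PySem.Dict.get?_insert_of_ne _ _ hvs, List.mem_cons]

theorem contains_foldl_insert_zero (v : Int × Int) (l : List (Int × Int)) :
    (l.foldl (fun d s => d.insert s 0)
      (PySem.Dict.empty : PySem.Dict (Int × Int) Int)).contains v = true ↔ v ∈ l := by
  rw [PySem.Dict.contains_eq_isSome_get?, get?_foldl_insert_zero v l PySem.Dict.empty]
  by_cases hv : v ∈ l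
  · simp [hv]
  · simp [hv, PySem.Dict.get?_empty]

-- folded max over the trees
theorem foldmax_le (f : (Int × Int) → Int) :
    ∀ (l : List (Int × Int)) (a c : Int), a ≤ c → (∀ x ∈ l, f x ≤ c) →
      l.foldl (fun a x => max a (f x)) a ≤ c
  | [], a, c, ha, _ => ha
  | x :: l, a, c, ha, hl => by
    rw [List.foldl_cons]
    exact foldmax_le f l _ c (max_le ha (hl x List.mem_cons_self))
      (fun y hy => hl y (List.mem_cons_of_mem _ hy))

theorem le_foldmax_init (f : (Int × Int) → Int) :
    ∀ (l : List (Int × Int)) (a : Int), a ≤ l.foldl (fun a x => max a (f x)) a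
  | [], a => le_refl a
  | x :: l, a => by
    rw [List.foldl_cons]
    exact le_trans (le_max_left a (f x)) (le_foldmax_init f l _)

theorem le_foldmax_mem (f : (Int × Int) → Int) :
    ∀ (l : List (Int × Int)) (a : Int) (x : Int × Int), x ∈ l →
      f x ≤ l.foldl (fun a x => max a (f x)) a
  | [], a, x, hx => by simp at hx
  | y :: l, a, x, hx => by
    rw [List.foldl_cons]
    rcases List.mem_cons.1 hx with rfl | hx
    · exact le_trans (le_max_right a (f x)) (le_foldmax_init f l _)
    · exact le_foldmax_mem f l _ x hx

-- ===== VERDICT (by name: the statement is the Claim_ definition above) =====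
theorem simple_flood_fill_spec : Claim_equal_simple_flood_fill := by
  intro canal trees todo _hdom hpre
  unfold Spec_simple_flood_fill
  have hcnd : (PySem.Set.ofList canal).Nodup := PySem.Set.nodup_ofList canal
  have hseenN : ∀ x ∈ PySem.Set.ofList trees,
      x ∈ pvSeen (PySem.Set.ofList canal) (PySem.Set.ofList todo) (canal.length + 2) := by
    intro x hx
    have hx' : x ∈ trees := by rw [PySem.Set.mem_ofList] at hx; exact hx
    have hr := hpre x hx'
    unfold pvReach at hr
    exact (mem_iter_pvGrow _ _ (canal.length + 1) x).1 hr
  have hex : ∃ m, ∀ x ∈ PySem.Set.ofList trees,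
      x ∈ pvSeen (PySem.Set.ofList canal) (PySem.Set.ofList todo) m := ⟨canal.length + 2, hseenN⟩
  have hm0 := Nat.find_spec hex
  have hmin : ∀ j, j < Nat.find hex → ∃ x ∈ PySem.Set.ofList trees,
      x ∉ pvSeen (PySem.Set.ofList canal) (PySem.Set.ofList todo) j := by
    intro j hj
    have h := Nat.find_min hex hj
    push_neg at h
    exact h
  have hm0le : Nat.find hex ≤ canal.length + 2 := Nat.find_le hseenN
  -- A's loop returns the least ring index covering all trees, minus one
  have hA : simple_flood_fill canal trees todo = (Nat.find hex : Int) - 1 := by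
    have hrun := loopA_run (PySem.Set.ofList canal) (PySem.Set.ofList trees)
      (PySem.Set.ofList todo) (Nat.find hex) (canal.length + 2) 0 0 hm0le
      (by intro x hx; simpa using hm0 x hx)
      (by intro j hj
          obtain ⟨x, hx, hnx⟩ := hmin j hj
          exact ⟨x, hx, by simpa using hnx⟩)
    show pvLoopA (PySem.Set.ofList canal) (PySem.Set.ofList trees) (canal.length + 2)
      (pvSeen (PySem.Set.ofList canal) (PySem.Set.ofList todo) 0)
      (pvFront (PySem.Set.ofList canal) (PySem.Set.ofList todo) 0) 0 = (Nat.find hex : Int) - 1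
    rw [hrun]
    ring
  -- B's queue loop ends with the dict of exact BFS distances
  have hfinal : ∀ v j, v ∈ pvFront (PySem.Set.ofList canal) (PySem.Set.ofList todo) j →
      (pvLoopB (PySem.Set.ofList canal) (todo.length + canal.length + 1)
        ((PySem.Set.ofList todo).foldl (fun d s => d.insert s 0) PySem.Dict.empty)
        (PySem.Set.ofList todo)).get? v = some (j : Int) := by
    have H3 : ∀ v, ((PySem.Set.ofList todo).foldl (fun d s => d.insert s 0)
        (PySem.Dict.empty : PySem.Dict (Int × Int) Int)).contains v = true ↔
        (v ∈ pvSeen (PySem.Set.ofList canal) (PySem.Set.ofList todo) 1 ∨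
          v ∈ ([] : List (Int × Int))) := by
      intro v
      rw [contains_foldl_insert_zero v (PySem.Set.ofList todo)]
      rw [pvSeen_succ, PySem.Set.mem_update, pvSeen_zero, pvFront_zero]
      simp [PySem.Set.empty]
    have H4 : ∀ v j, j ≤ 0 + 1 → v ∈ pvFront (PySem.Set.ofList canal) (PySem.Set.ofList todo) j →
        ((PySem.Set.ofList todo).foldl (fun d s => d.insert s 0)
          (PySem.Dict.empty : PySem.Dict (Int × Int) Int)).contains v = true →
        ((PySem.Set.ofList todo).foldl (fun d s => d.insert s 0)
          (PySem.Dict.empty : PySem.Dict (Int × Int) Int)).get? v = some (j : Int) := by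
      intro v j hj hvj hcont
      have hvt : v ∈ PySem.Set.ofList todo := (contains_foldl_insert_zero v _).1 hcont
      cases j with
      | zero =>
        rw [get?_foldl_insert_zero v (PySem.Set.ofList todo) PySem.Dict.empty]
        simp [hvt]
      | succ j' =>
        have hj0 : j' = 0 := by omega
        subst hj0
        exact absurd (pvFront_subset_seen (PySem.Set.ofList canal) (PySem.Set.ofList todo)
            (Nat.lt_succ_self 0)
            (show v ∈ pvFront (PySem.Set.ofList canal) (PySem.Set.ofList todo) 0 from hvt))
          (pvFront_not_seen (PySem.Set.ofList canal) (PySem.Set.ofList todo) hvj)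
    have H5 : ∀ v, v ∈ pvFront (PySem.Set.ofList canal) (PySem.Set.ofList todo) (0 + 1) →
        (v ∈ ([] : List (Int × Int)) ∨ ∃ u ∈ PySem.Set.ofList todo, v ∈ pvNbrs u) := by
      intro v hv
      rw [pvFront_succ, mem_pvNextTodo] at hv
      obtain ⟨⟨u, hu, hnb⟩, -, -⟩ := hv
      exact Or.inr ⟨u, hu, hnb⟩
    have hfuel : ((PySem.Set.ofList todo) ++ ([] : List (Int × Int))).length +
        pvCdiff (PySem.Set.ofList canal)
          ((PySem.Set.ofList todo).foldl (fun d s => d.insert s 0) PySem.Dict.empty) ≤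
        todo.length + canal.length + 1 := by
      have h1 := PySem.Set.length_ofList_le todo
      have h2 : pvCdiff (PySem.Set.ofList canal)
          ((PySem.Set.ofList todo).foldl (fun d s => d.insert s 0) PySem.Dict.empty) ≤
          (PySem.Set.ofList canal).length := List.length_filter_le _ _
      have h3 := PySem.Set.length_ofList_le canal
      simp only [List.append_nil]
      omega
    intro v j hv
    have h := loopB_run (PySem.Set.ofList canal) (PySem.Set.ofList todo) hcnd
      (todo.length + canal.length + 1)
      ((PySem.Set.ofList todo).foldl (fun d s => d.insert s 0) PySem.Dict.empty)
      0 (PySem.Set.ofList todo) [] (fun v hv => hv) (by intro v hv; simp at hv)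
      H3 H4 H5 hfuel v j hv
    rwa [List.append_nil] at h
  -- B returns the max recorded distance over the trees
  have hB : simple_flood_fill_alt canal trees todo = (Nat.find hex : Int) - 1 := by
    show (PySem.Set.ofList trees).foldl
        (fun acc t => max acc (((pvLoopB (PySem.Set.ofList canal)
          (todo.length + canal.length + 1)
          ((PySem.Set.ofList todo).foldl (fun d s => d.insert s 0) PySem.Dict.empty)
          (PySem.Set.ofList todo)).get? t).getD (-1))) (-1) = (Nat.find hex : Int) - 1
    cases hcase : Nat.find hex with
    | zero =>
      have htrees : PySem.Set.ofList trees = [] := by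
        apply List.eq_nil_iff_forall_not_mem.2
        intro x hx
        have hxs := hm0 x hx
        rw [hcase, mem_pvSeen_iff] at hxs
        obtain ⟨j, hj, -⟩ := hxs
        omega
      rw [htrees]
      norm_num
    | succ m' =>
      have hmax : (PySem.Set.ofList trees).foldl
          (fun acc t => max acc (((pvLoopB (PySem.Set.ofList canal)
            (todo.length + canal.length + 1)
            ((PySem.Set.ofList todo).foldl (fun d s => d.insert s 0) PySem.Dict.empty)
            (PySem.Set.ofList todo)).get? t).getD (-1))) (-1) = (m' : Int) := by
        apply le_antisymm
        · apply foldmax_le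
          · omega
          · intro x hx
            obtain ⟨j, hj, hxj⟩ :=
              (mem_pvSeen_iff (PySem.Set.ofList canal) (PySem.Set.ofList todo)
                (Nat.find hex) x).1 (hm0 x hx)
            rw [hfinal x j hxj]
            simp only [Option.getD_some]
            rw [hcase] at hj
            exact_mod_cast Nat.lt_succ_iff.1 hj
        · obtain ⟨x0, hx0, hnx0⟩ := hmin m' (by rw [hcase]; omega)
          obtain ⟨j, hj, hxj⟩ :=
            (mem_pvSeen_iff (PySem.Set.ofList canal) (PySem.Set.ofList todo)
              (Nat.find hex) x0).1 (hm0 x0 hx0)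
          have hjm : j = m' := by
            rw [hcase] at hj
            by_contra hne
            have hjlt : j < m' := by omega
            exact hnx0 (pvFront_subset_seen _ _ hjlt hxj)
          subst hjm
          have hle := le_foldmax_mem
            (fun t => ((pvLoopB (PySem.Set.ofList canal) (todo.length + canal.length + 1)
              ((PySem.Set.ofList todo).foldl (fun d s => d.insert s 0) PySem.Dict.empty)
              (PySem.Set.ofList todo)).get? t).getD (-1))
            (PySem.Set.ofList trees) (-1) x0 hx0
          simp only [hfinal x0 j hxj, Option.getD_some] at hle
          exact hle
      rw [hmax]
      push_cast
      ring
  rw [hA, hB]
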